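-- pv_equiv track=rewrite | github.com/OBenjaminT/advent-of-code-in-python | 2019/Day 8/Part 2/program.py | imgSplitter
-- ===== SOURCE A (Python) =====
-- def imgSplitter(img, width, height):
--     imgArrLayers = []
--     for l in range(0, len(img), width*height):
--         imgArrLayers.append(img[l:l+(width*height)])
--     imgArrLines = []
--     for layer in imgArrLayers:
--         imgArrLine = []
--         for l in range(0, len(layer), width):
--             imgArrLine.append(layer[l:l+width])
--         imgArrLines.append(imgArrLine)
--     imgArrPixels = []
--     for layer in imgArrLines:
--         imgArrPixel = []
--         for line in layer:
--             imgArrPixel.append(list(line))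
--         imgArrPixels.append(imgArrPixel)
--     return imgArrPixels
-- ===== SOURCE B (Python) =====
-- def imgSplitter(img, width, height):
--     rows = [list(img[i:i+width]) for i in range(0, len(img), width)]
--     return [rows[j:j+height] for j in range(0, len(rows), height)]
-- ===== Notes on version B (the rewrite author's own statement) =====
-- stated objective: simpler
-- what changed: B inverts A's decomposition: instead of slicing the image into width*height layers and then each layer into width rows and then listing chars (three staged passes), B chops the whole image into width-rows once and then groups those rows into blocks of height, relying on layer boundaries aligning with row boundaries since width*height is a multiple of width.
-- intended difference: On width<0 and height<0 with a nonempty image, A returns ceil(len(img)/(width*height)) empty layers (an artefact of the positive step width*height feeding empty inner row-ranges), while B returns [], the sensible result for negative dimensions. — e.g. on imgSplitter("a", -1, -1): A returns [[]], B returns []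
import Mathlib
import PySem

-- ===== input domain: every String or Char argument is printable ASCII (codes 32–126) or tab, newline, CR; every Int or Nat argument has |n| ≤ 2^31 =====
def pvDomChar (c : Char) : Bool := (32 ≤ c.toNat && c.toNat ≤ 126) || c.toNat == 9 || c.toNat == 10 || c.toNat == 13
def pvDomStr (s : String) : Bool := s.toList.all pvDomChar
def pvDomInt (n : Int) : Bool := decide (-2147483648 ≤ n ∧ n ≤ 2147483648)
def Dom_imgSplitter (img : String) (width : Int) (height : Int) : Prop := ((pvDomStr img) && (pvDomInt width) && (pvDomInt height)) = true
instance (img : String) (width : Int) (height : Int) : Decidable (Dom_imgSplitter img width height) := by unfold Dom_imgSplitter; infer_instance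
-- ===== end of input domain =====

-- B chops the image into width-rows first and then groups rows by height (opposite pass order to A's
-- layers-then-rows-then-chars); on width<0 ∧ height<0 with nonempty img B returns [] where A returns
-- empty layers (see D_ below). Objective: simpler.


-- ===== PORT A =====
def imgSplitter (img : String) (width : Int) (height : Int) : List (List (List String)) :=
  let cs := img.toList
  let imgArrLayers : List (List Char) :=
    (PySem.List.pyRange 0 (cs.length : Int) (width * height)).foldl
      (fun acc l => acc ++ [PySem.List.slice cs (some l) (some (l + width * height))]) []
  let imgArrLines : List (List (List Char)) :=
    imgArrLayers.foldl
      (fun acc layer => acc ++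
        [(PySem.List.pyRange 0 (layer.length : Int) width).foldl
          (fun acc2 l => acc2 ++ [PySem.List.slice layer (some l) (some (l + width))]) []]) []
  let imgArrPixels : List (List (List String)) :=
    imgArrLines.foldl
      (fun acc layer => acc ++
        [layer.foldl (fun acc2 line => acc2 ++ [line.map (fun c => String.ofList [c])]) []]) []
  imgArrPixels

-- ===== PORT B =====
def imgSplitter_alt (img : String) (width : Int) (height : Int) : List (List (List String)) :=
  let cs := img.toList
  let rows : List (List String) :=
    (PySem.List.pyRange 0 (cs.length : Int) width).map (fun i =>
      (PySem.List.slice cs (some i) (some (i + width))).map (fun c => String.ofList [c]))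
  (PySem.List.pyRange 0 (rows.length : Int) height).map (fun j =>
    PySem.List.slice rows (some j) (some (j + height)))

-- ===== PRECONDITION & SPEC =====
-- Pre_ excludes exactly width = 0 or height = 0, where both Pythons raise ValueError (range() with step 0).
def Pre_imgSplitter (img : String) (width : Int) (height : Int) : Prop := width ≠ 0 ∧ height ≠ 0
instance (img : String) (width : Int) (height : Int) : Decidable (Pre_imgSplitter img width height) := by unfold Pre_imgSplitter; infer_instance
def pvWitness_imgSplitter : String × Int × Int := ("123456789012", 3, 2)

-- On width<0 and height<0 with a nonempty image A returns ceil(len/(width*height)) empty layers — an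
-- artefact of the positive step width*height feeding empty inner ranges — while B returns [], the
-- sensible result for negative dimensions.
def D_imgSplitter (img : String) (width : Int) (height : Int) : Prop :=
  width < 0 ∧ height < 0 ∧ img ≠ ""
instance (img : String) (width : Int) (height : Int) : Decidable (D_imgSplitter img width height) := by unfold D_imgSplitter; infer_instance

def Spec_imgSplitter (img : String) (width : Int) (height : Int) (out : List (List (List String))) : Prop := ¬ D_imgSplitter img width height → out = imgSplitter_alt img width height
instance (img : String) (width : Int) (height : Int) (out : List (List (List String))) : Decidable (Spec_imgSplitter img width height out) := by unfold Spec_imgSplitter; infer_instance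

def pvDiffWitness_imgSplitter : String × Int × Int := ("a", -1, -1)
def pvDiffWitnessOut_imgSplitter : (List (List (List String))) × (List (List (List String))) :=
  ([[]], [])

-- ===== CLAIM (what is proved, stated in full; the proofs are below) =====
def Claim_unchanged_imgSplitter : Prop := ∀ (img : String) (width : Int) (height : Int), Dom_imgSplitter img width height → Pre_imgSplitter img width height → Spec_imgSplitter img width height (imgSplitter img width height)
def Claim_changed_imgSplitter : Prop := Dom_imgSplitter (pvDiffWitness_imgSplitter.1) (pvDiffWitness_imgSplitter.2.1) (pvDiffWitness_imgSplitter.2.2) ∧ Pre_imgSplitter (pvDiffWitness_imgSplitter.1) (pvDiffWitness_imgSplitter.2.1) (pvDiffWitness_imgSplitter.2.2) ∧ D_imgSplitter (pvDiffWitness_imgSplitter.1) (pvDiffWitness_imgSplitter.2.1) (pvDiffWitness_imgSplitter.2.2) ∧ imgSplitter (pvDiffWitness_imgSplitter.1) (pvDiffWitness_imgSplitter.2.1) (pvDiffWitness_imgSplitter.2.2) = pvDiffWitnessOut_imgSplitter.1 ∧ imgSplitter_alt (pvDiffWitness_imgSplitter.1) (pvDiffWitness_imgSplitter.2.1) (pvDiffWitness_imgSplitter.2.2)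 = pvDiffWitnessOut_imgSplitter.2 ∧ pvDiffWitnessOut_imgSplitter.1 ≠ pvDiffWitnessOut_imgSplitter.2
def Claim_exact_imgSplitter : Prop := ∀ (img : String) (width : Int) (height : Int), Dom_imgSplitter img width height → Pre_imgSplitter img width height → D_imgSplitter img width height → imgSplitter img width height ≠ imgSplitter_alt img width height

-- ===== LEMMAS AND PROOFS =====

-- an empty range: start = stop, any step
theorem pyRange_self_nil (a s : Int) : PySem.List.pyRange a a s = [] := by
  rcases lt_trichotomy s 0 with h | h | h
  · simp only [PySem.List.pyRange]
    rw [if_neg (by omega : ¬ s = 0), if_neg (by omega : ¬ 0 < s), if_neg (lt_irrefl a)]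
    simp
  · subst h; simp [PySem.List.pyRange]
  · rw [PySem.List.pyRange_of_pos _ _ h, if_neg (lt_irrefl a)]; rfl

-- range with a negative step and start ≤ stop is empty
theorem pyRange_neg_nil {a b s : Int} (hs : s < 0) (hab : a ≤ b) :
    PySem.List.pyRange a b s = [] := by
  simp only [PySem.List.pyRange]
  rw [if_neg (by omega : ¬ s = 0)]
  rw [if_neg (by omega : ¬ 0 < s), if_neg (by omega : ¬ b < a)]
  simp

-- Galois characterisation of the ceiling division (n + k - 1) / k
theorem ceil_le_iff {n k x : ℕ} (hk : 0 < k) : (n + k - 1) / k ≤ x ↔ n ≤ k * x := by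
  rw [Nat.div_le_iff_le_mul_add_pred hk]
  omega

theorem le_ceil_mul {n k : ℕ} (hk : 0 < k) : n ≤ k * ((n + k - 1) / k) :=
  (ceil_le_iff hk).mp le_rfl

theorem ceil_mono {a b k : ℕ} (h : a ≤ b) : (a + k - 1) / k ≤ (b + k - 1) / k :=
  Nat.div_le_div_right (by omega)

theorem ceil_add_mul {a m k : ℕ} (hk : 0 < k) :
    (a + m * k + k - 1) / k = (a + k - 1) / k + m := by
  have : a + m * k + k - 1 = (a + k - 1) + m * k := by omega
  rw [this, Nat.add_mul_div_right _ _ hk]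

theorem ceil_mul_self {k h : ℕ} (hk : 0 < k) : (k * h + k - 1) / k = h := by
  have heq : k * h + k - 1 = (k - 1) + h * k := by rw [Nat.mul_comm k h]; omega
  rw [heq, Nat.add_mul_div_right _ _ hk, Nat.div_eq_of_lt (by omega)]
  omega

-- nested ceilings collapse: ⌈⌈n/w⌉/h⌉ = ⌈n/(w*h)⌉
theorem ceil_ceil {n w h : ℕ} (hw : 0 < w) (hh : 0 < h) :
    (((n + w - 1) / w) + h - 1) / h = (n + w * h - 1) / (w * h) := by
  apply le_antisymm
  · rw [ceil_le_iff hh, ceil_le_iff hw]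
    calc n ≤ (w * h) * ((n + w * h - 1) / (w * h)) := le_ceil_mul (Nat.mul_pos hw hh)
      _ = w * (h * ((n + w * h - 1) / (w * h))) := by ring
  · rw [ceil_le_iff (Nat.mul_pos hw hh)]
    calc n ≤ w * ((n + w - 1) / w) := le_ceil_mul hw
      _ ≤ w * (h * ((((n + w - 1) / w) + h - 1) / h)) :=
          Nat.mul_le_mul_left _ (le_ceil_mul hh)
      _ = (w * h) * ((((n + w - 1) / w) + h - 1) / h) := by ring

-- the clamped layer's row count: ⌈min(w*h, q)/w⌉ = min h ⌈q/w⌉  when q ≤ anything, via cases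
theorem ceil_min {q w h : ℕ} (hw : 0 < w) (hh : 0 < h) :
    (min (w * h) q + w - 1) / w = min h ((q + w - 1) / w) := by
  rcases le_total (w * h) q with hle | hle
  · rw [min_eq_left hle, ceil_mul_self hw]
    have : h ≤ (q + w - 1) / w := by
      have := ceil_mono (k := w) hle
      rw [ceil_mul_self hw] at this
      exact this
    omega
  · rw [min_eq_right hle]
    have : (q + w - 1) / w ≤ h := by
      have := ceil_mono (k := w) hle
      rw [ceil_mul_self hw] at this
      exact this
    omega

-- a positive-step range over [0, len) of slices IS the chunking of the list
theorem chunk_map {α : Type} (xs : List α) (k : ℕ) (hk : 0 < k) :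
    (PySem.List.pyRange 0 (xs.length : Int) (k : Int)).map
      (fun i => PySem.List.slice xs (some i) (some (i + (k : Int))))
    = (List.range ((xs.length + k - 1) / k)).map (fun t => (xs.drop (t * k)).take k) := by
  rw [PySem.List.pyRange_of_pos _ _ (by exact_mod_cast hk), List.map_map]
  rcases Nat.eq_zero_or_pos xs.length with h0 | hpos
  · rw [if_neg (by simp [h0])]
    have hz : (xs.length + k - 1) / k = 0 := by
      rw [h0]; exact Nat.div_eq_of_lt (by omega)
    rw [hz]
    simp
  · rw [if_pos (by exact_mod_cast hpos)]
    have hcnt : (((xs.length : Int) - 0 + k - 1) / k).toNat = (xs.length + k - 1) / k := by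
      have heq : ((xs.length : Int) - 0 + k - 1) = ((xs.length + k - 1 : ℕ) : Int) := by
        push_cast; omega
      rw [heq, ← Int.natCast_div]
      exact Int.toNat_natCast _
    rw [hcnt]
    apply List.map_congr_left
    intro t _
    simp only [Function.comp_apply, zero_add]
    have hcast : (k : Int) * (t : ℕ) = ((t * k : ℕ) : Int) := by push_cast; ring
    rw [hcast]
    exact PySem.List.slice_natCast_add xs (t * k) k

-- drop-take of a mapped range is a shifted mapped range
theorem drop_take_map_range {β : Type} (f : ℕ → β) (M a b : ℕ) :
    ((((List.range M).map f).drop a).take b) = (List.range (min b (M - a))).map (fun i => f (a + i)) := by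
  apply List.ext_getElem
  · simp <;> omega
  · intro i h1 h2
    simp only [List.getElem_take, List.getElem_drop, List.getElem_map, List.getElem_range]

-- both ports in closed chunked form (positive dimensions)
theorem portA_closed (img : String) (w h : ℕ) (hw : 0 < w) (hh : 0 < h) :
    imgSplitter img (w : Int) (h : Int)
    = (List.range ((img.toList.length + w * h - 1) / (w * h))).map (fun t =>
        (List.range ((min (w * h) (img.toList.length - t * (w * h)) + w - 1) / w)).map (fun r =>
          (((img.toList.drop (t * (w * h))).take (w * h)).drop (r * w)).take w |>.map (fun c => String.ofList [c]))) := by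
  simp only [imgSplitter, PySem.List.foldl_append_singleton_eq_map, List.nil_append]
  have hWH : ((w : Int) * (h : Int)) = ((w * h : ℕ) : Int) := by push_cast; ring
  rw [hWH, chunk_map img.toList (w * h) (Nat.mul_pos hw hh), List.map_map, List.map_map]
  apply List.map_congr_left
  intro t _
  simp only [Function.comp_apply]
  have hlen : ((img.toList.drop (t * (w * h))).take (w * h)).length
      = min (w * h) (img.toList.length - t * (w * h)) := by
    simp [List.length_take, List.length_drop]
  rw [chunk_map _ w hw, hlen, List.map_map]
  rfl

theorem portB_closed (img : String) (w h : ℕ) (hw : 0 < w) (hh : 0 < h) :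
    imgSplitter_alt img (w : Int) (h : Int)
    = (List.range (((img.toList.length + w - 1) / w + h - 1) / h)).map (fun t =>
        (List.range (min h ((img.toList.length + w - 1) / w - t * h))).map (fun r =>
          ((img.toList.drop ((t * h + r) * w)).take w).map (fun c => String.ofList [c]))) := by
  simp only [imgSplitter_alt]
  have hrows : (PySem.List.pyRange 0 (img.toList.length : Int) (w : Int)).map
      (fun i => (PySem.List.slice img.toList (some i) (some (i + (w : Int)))).map (fun c => String.ofList [c]))
      = (List.range ((img.toList.length + w - 1) / w)).map
          (fun t => ((img.toList.drop (t * w)).take w).map (fun c => String.ofList [c])) := by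
    have hc := congrArg (List.map (List.map (fun c => String.ofList [c]))) (chunk_map img.toList w hw)
    rw [List.map_map, List.map_map] at hc
    exact hc
  rw [hrows, chunk_map _ h hh, List.length_map, List.length_range]
  apply List.map_congr_left
  intro t _
  rw [drop_take_map_range]

-- main agreement for positive dimensions
theorem agree_pos (img : String) (w h : ℕ) (hw : 0 < w) (hh : 0 < h) :
    imgSplitter img (w : Int) (h : Int) = imgSplitter_alt img (w : Int) (h : Int) := by
  rw [portA_closed img w h hw hh, portB_closed img w h hw hh]
  rw [ceil_ceil hw hh]
  apply List.map_congr_left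
  intro t ht
  rw [List.mem_range] at ht
  set n := img.toList.length with hn
  -- t is a genuine layer start: t * (w*h) < n
  have htn : t * (w * h) < n := by
    by_contra hcon
    push_neg at hcon
    have hceil : (n + w * h - 1) / (w * h) ≤ t := by
      rw [ceil_le_iff (Nat.mul_pos hw hh), Nat.mul_comm]
      exact hcon
    omega
  -- the A-side row count, rewritten through the B-side quantities
  have hsplitCeil : (n + w - 1) / w = ((n - t * (w * h)) + w - 1) / w + t * h := by
    have hsplit : n = (n - t * (w * h)) + (t * h) * w := by
      have : t * (w * h) = (t * h) * w := by ring
      omega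
    conv_lhs => rw [hsplit]
    rw [ceil_add_mul hw]
  have hle : (min (w * h) (n - t * (w * h)) + w - 1) / w ≤ h := by
    have := ceil_mono (k := w) (min_le_left (w * h) (n - t * (w * h)))
    rw [ceil_mul_self hw] at this
    exact this
  have hle' : ((n - t * (w * h)) + w - 1) / w ≤ h + ((n - t * (w * h)) + w - 1) / w := by omega
  have hq : min h ((n + w - 1) / w - t * h) = (min (w * h) (n - t * (w * h)) + w - 1) / w := by
    rw [hsplitCeil, Nat.add_sub_cancel, ceil_min hw hh]
  rw [hq]
  apply List.map_congr_left
  intro r hr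
  rw [List.mem_range] at hr
  -- r < h : the row slice inside the layer never crosses the layer's nominal end
  have hrh : r < h := by omega
  have key : (((img.toList.drop (t * (w * h))).take (w * h)).drop (r * w)).take w
      = (img.toList.drop ((t * h + r) * w)).take w := by
    rw [List.drop_take, List.take_take, List.drop_drop]
    have h1 : min w (w * h - r * w) = w := by
      have hb : r * w + w ≤ w * h := by
        calc r * w + w = (r + 1) * w := by ring
          _ ≤ h * w := Nat.mul_le_mul_right _ (by omega)
          _ = w * h := Nat.mul_comm _ _
      omega
    have h2 : t * (w * h) + r * w = (t * h + r) * w := by ring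
    rw [h1, h2]
  rw [key]

-- B is [] when width < 0 (its row range is empty, so the grouping range is over length 0)
theorem portB_neg_width (img : String) (width height : Int) (hw : width < 0) (hh : height ≠ 0) :
    imgSplitter_alt img width height = [] := by
  simp only [imgSplitter_alt]
  rw [pyRange_neg_nil hw (by positivity)]
  simp only [List.map_nil, List.length_nil]
  rcases lt_or_gt_of_ne hh with hneg | hpos
  · rw [pyRange_neg_nil hneg (by omega)]; rfl
  · rw [PySem.List.pyRange_of_pos _ _ hpos, if_neg (by omega)]; rfl

-- A is [] when width*height < 0
theorem portA_neg_wh (img : String) (width height : Int) (hwh : width * height < 0) :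
    imgSplitter img width height = [] := by
  simp only [imgSplitter]
  rw [pyRange_neg_nil hwh (by positivity)]
  rfl

-- ===== VERDICT (by name: the statement is the Claim_ definition above) =====

theorem imgSplitter_spec : Claim_unchanged_imgSplitter := by
  intro img width height _hdom hpre hnd
  show imgSplitter img width height = imgSplitter_alt img width height
  obtain ⟨hw0, hh0⟩ := hpre
  rcases lt_or_gt_of_ne hw0 with hwneg | hwpos
  · rcases lt_or_gt_of_ne hh0 with hhneg | hhpos
    · -- both negative: ¬D_ forces img = ""
      have himg : img = "" := by
        by_contra hne
        exact hnd ⟨hwneg, hhneg, hne⟩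
      subst himg
      simp only [imgSplitter, imgSplitter_alt, show ("" : String).toList = [] from rfl,
        List.length_nil, Nat.cast_zero, pyRange_self_nil, List.foldl_nil, List.map_nil]
    · -- width < 0 < height: both sides []
      rw [portA_neg_wh _ _ _ (mul_neg_of_neg_of_pos hwneg hhpos), portB_neg_width _ _ _ hwneg hh0]
  · rcases lt_or_gt_of_ne hh0 with hhneg | hhpos
    · -- height < 0 < width: A = [] since wh < 0; B = [] since its outer step is negative
      rw [portA_neg_wh _ _ _ (mul_neg_of_pos_of_neg hwpos hhneg)]
      simp only [imgSplitter_alt]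
      rw [pyRange_neg_nil hhneg (by positivity)]
      rfl
    · -- both positive: the real case
      obtain ⟨w, rfl⟩ : ∃ w : ℕ, width = (w : Int) := ⟨width.toNat, by omega⟩
      obtain ⟨h, rfl⟩ : ∃ h : ℕ, height = (h : Int) := ⟨height.toNat, by omega⟩
      exact agree_pos img w h (by exact_mod_cast hwpos) (by exact_mod_cast hhpos)

theorem imgSplitter_changed : Claim_changed_imgSplitter := by
  unfold Claim_changed_imgSplitter; decide

theorem imgSplitter_tight : Claim_exact_imgSplitter := by
  intro img width height _hdom hpre hd
  obtain ⟨hwneg, hhneg, hne⟩ := hd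
  -- B = []
  rw [portB_neg_width _ _ _ hwneg hpre.2]
  -- A ≠ []: its outer range is nonempty since 0 < len and 0 < width*height
  have hn : img.toList ≠ [] := by
    intro hnil
    exact hne (by rw [← String.ofList_toList (s := img), hnil])
  have hn' : 0 < img.toList.length := List.length_pos_iff.mpr hn
  have hwh : (0:Int) < width * height := mul_pos_of_neg_of_neg hwneg hhneg
  simp only [imgSplitter, PySem.List.foldl_append_singleton_eq_map, List.nil_append, List.map_map]
  intro hcon
  rw [List.map_eq_nil_iff] at hcon
  have hmem : (0:Int) ∈ PySem.List.pyRange 0 (img.toList.length : Int) (width * height) := by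
    rw [PySem.List.mem_pyRange_iff_of_pos hwh]
    exact ⟨le_rfl, by exact_mod_cast hn', ⟨0, by ring⟩⟩
  rw [hcon] at hmem
  exact absurd hmem (List.not_mem_nil)
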